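-- pv_equiv track=rewrite | github.com/atinzad/renamerApp | src/app/services/schema_builder_service.py | _is_valid_key
-- ===== SOURCE A (Python) =====
-- def _is_valid_key(key: str) -> bool:
--     if not key or len(key) > 40:
--         return False
--     if not key.isascii():
--         return False
--     for ch in key:
--         if not (ch.islower() or ch.isdigit() or ch == "_"):
--             return False
--     return True
-- ===== SOURCE B (Python) =====
-- import re
--
-- def _is_valid_key(key: str) -> bool:
--     return re.fullmatch(r'[a-z0-9_]{1,40}', key) is not None
-- ===== Notes on version B (the rewrite author's own statement) =====
-- stated objective: idiomatic
-- what changed: Replaced the length guard, isascii pre-check and explicit per-character loop with a single regex fullmatch of [a-z0-9_]{1,40}, whose quantifier enforces non-empty and the 40-char cap and whose ASCII-only character class subsumes the isascii test.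
import Mathlib
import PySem

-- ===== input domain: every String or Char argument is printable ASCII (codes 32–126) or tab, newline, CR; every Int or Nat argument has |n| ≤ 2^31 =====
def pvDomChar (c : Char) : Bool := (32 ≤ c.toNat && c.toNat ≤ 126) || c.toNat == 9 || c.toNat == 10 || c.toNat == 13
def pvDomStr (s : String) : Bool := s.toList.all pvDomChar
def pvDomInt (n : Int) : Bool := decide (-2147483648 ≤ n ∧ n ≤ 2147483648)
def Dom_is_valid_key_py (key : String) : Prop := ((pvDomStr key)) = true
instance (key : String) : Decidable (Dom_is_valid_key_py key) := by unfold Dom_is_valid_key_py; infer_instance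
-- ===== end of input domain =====

-- B replaces A's length guard, isascii pre-check and per-character loop with one
-- regex fullmatch of [a-z0-9_]{1,40} (more idiomatic; same O(n) cost).


-- ===== PORT A =====
-- str.isascii(): ported by hand, exact — true iff every code point is < 128
def pvIsascii (cs : List Char) : Bool := cs.all (fun c => c.toNat < 128)

-- the body of A's for-loop: return False on the first offending char, else True
def pvALoop : List Char → Bool
  | [] => true
  | c :: rest =>
    if !(PySem.Chars.islower c || PySem.Chars.isdigit c || c == '_') then false
    else pvALoop rest

def is_valid_key_py (key : String) : Bool :=
  if key.toList.isEmpty || decide ((PySem.Str.len key) > 40) then false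
  else if !(pvIsascii key.toList) then false
  else pvALoop key.toList

-- ===== PORT B =====
-- the regex character class [a-z0-9_]
def pvClass (c : Char) : Bool :=
  (decide ('a' ≤ c) && decide (c ≤ 'z')) || (decide ('0' ≤ c) && decide (c ≤ '9')) || c == '_'

-- greedy matcher for the regex [a-z0-9_]{1,40} anchored at both ends:
-- n = chars consumed so far; accept at end of input iff at least one char was consumed
def pvMatch : List Char → Nat → Bool
  | [], n => decide (1 ≤ n)
  | c :: rest, n => if n < 40 && pvClass c then pvMatch rest (n + 1) else false

def is_valid_key_py_alt (key : String) : Bool := pvMatch key.toList 0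

-- ===== PRECONDITION & SPEC =====
def Spec_is_valid_key_py (key : String) (out : Bool) : Prop := out = is_valid_key_py_alt key
instance (key : String) (out : Bool) : Decidable (Spec_is_valid_key_py key out) := by unfold Spec_is_valid_key_py; infer_instance

-- ===== CLAIM (what is proved, stated in full; the proofs are below) =====
def Claim_equal_is_valid_key_py : Prop := ∀ (key : String), Dom_is_valid_key_py key → Spec_is_valid_key_py key (is_valid_key_py key)

-- ===== LEMMAS AND PROOFS =====

theorem pvALoop_eq_all (cs : List Char) : pvALoop cs = cs.all pvClass := by
  induction cs with
  | nil => rfl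
  | cons c rest ih =>
    have hcc : (PySem.Chars.islower c || PySem.Chars.isdigit c || c == '_') = pvClass c := rfl
    simp only [pvALoop, hcc, ih, List.all_cons]
    cases hc : pvClass c <;> simp [hc]

theorem pvMatch_eq (cs : List Char) : ∀ n : Nat, n ≤ 40 →
    pvMatch cs n = (decide (1 ≤ n + cs.length) && decide (n + cs.length ≤ 40) && cs.all pvClass) := by
  induction cs with
  | nil => intro n hn; simp [pvMatch]; omega
  | cons c rest ih =>
    intro n hn
    simp only [pvMatch, List.all_cons, List.length_cons]
    by_cases hc : pvClass c = true
    · by_cases h40 : n < 40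
      · rw [if_pos (by simp [hc, h40]), ih (n + 1) (by omega)]
        have e1 : decide (1 ≤ n + 1 + rest.length) = decide (1 ≤ n + (rest.length + 1)) := by
          rw [decide_eq_decide]; omega
        have e2 : decide (n + 1 + rest.length ≤ 40) = decide (n + (rest.length + 1) ≤ 40) := by
          rw [decide_eq_decide]; omega
        rw [e1, e2, hc]
        rfl
      · rw [if_neg (by simp [h40])]
        have : ¬ (n + (rest.length + 1) ≤ 40) := by omega
        simp [this]
    · rw [if_neg (by simp [hc])]
      simp [hc]

-- a char accepted by the class is ASCII
theorem pvClass_ascii (c : Char) (h : pvClass c = true) : c.toNat < 128 := by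
  simp only [pvClass, Bool.or_eq_true, Bool.and_eq_true, decide_eq_true_eq, beq_iff_eq] at h
  rcases h with (⟨_, h2⟩ | ⟨_, h2⟩) | h2
  · have h3 : c.toNat ≤ 'z'.toNat := Fin.mk_le_mk.mp h2
    have : 'z'.toNat = 122 := by decide
    omega
  · have h3 : c.toNat ≤ '9'.toNat := Fin.mk_le_mk.mp h2
    have : '9'.toNat = 57 := by decide
    omega
  · subst h2; decide

theorem is_valid_key_py_spec : Claim_equal_is_valid_key_py := by
  intro key _
  unfold Spec_is_valid_key_py is_valid_key_py is_valid_key_py_alt PySem.Str.len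
  rw [pvMatch_eq key.toList 0 (by omega)]
  generalize key.toList = cs
  simp only [Nat.zero_add]
  by_cases hempty : cs.isEmpty
  · rw [if_pos (by simp [hempty])]
    have : cs.length = 0 := by simpa [List.isEmpty_iff_length_eq_zero] using hempty
    simp [this]
  · have h1 : 1 ≤ cs.length := by
      rcases Nat.eq_zero_or_pos cs.length with h | h
      · exact absurd (by simpa [List.isEmpty_iff_length_eq_zero] using h) hempty
      · exact h
    by_cases hlen : ((cs.length : Int) > 40)
    · rw [if_pos (by simp [hlen])]
      have : ¬ (cs.length ≤ 40) := by exact_mod_cast by omega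
      simp [this]
    · have h2 : cs.length ≤ 40 := by omega
      rw [if_neg (by simp [hempty, hlen])]
      by_cases hasc : pvIsascii cs
      · rw [if_neg (by simp [hasc]), pvALoop_eq_all]
        simp [h1, h2]
      · rw [if_pos (by simp [hasc])]
        simp only [pvIsascii, List.all_eq_true, not_forall] at hasc
        obtain ⟨c, hc, hbig⟩ := hasc
        have hall : cs.all pvClass = false := by
          rw [List.all_eq_false]
          exact ⟨c, hc, by
            intro h
            exact absurd (pvClass_ascii c h) (by simpa using hbig)⟩
        simp [hall]
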